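-- pv_equiv track=rewrite | github.com/ReadyDynamic/ReadyDynamic | dynamic_info_fix/dynamic_info_fix.py | seperate_merged_list
-- ===== SOURCE A (Python) =====
-- def seperate_merged_list(merged_value_list, split_prefixes=None):
--     extract_lists = []
--
--     if split_prefixes:
--         prefix_buckets = {p: [] for p in split_prefixes}
--         other_bucket = []
--
--         for v in merged_value_list:
--             matched = False
--             for p in split_prefixes:
--                 if v.startswith(p):
--                     prefix_buckets[p].append(v)
--                     matched = True
--                     break
--             if not matched:
--                 other_bucket.append(v)
--
--         # 只对「至少有 2 个 value」的 bucket 做 extract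
--         for bucket in prefix_buckets.values():
--             if len(bucket) >= 2:
--                 extract_lists.append(bucket)
--
--         if len(other_bucket) >= 2:
--             extract_lists.append(other_bucket)
--
--         # fallback：全都没拆开
--         if not extract_lists:
--             extract_lists = [merged_value_list]
--
--     else:
--         extract_lists = [merged_value_list]
--     return extract_lists
-- ===== SOURCE B (Python) =====
-- def seperate_merged_list(merged_value_list, split_prefixes=None):
--     if not split_prefixes:
--         return [merged_value_list]
--     remaining = merged_value_list
--     buckets = []
--     for p in split_prefixes:
--         buckets.append([v for v in remaining if v.startswith(p)])
--         remaining = [v for v in remaining if not v.startswith(p)]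
--     extract_lists = [b for b in buckets if len(b) >= 2]
--     if len(remaining) >= 2:
--         extract_lists.append(remaining)
--     if not extract_lists:
--         extract_lists = [merged_value_list]
--     return extract_lists
-- ===== Notes on version B (the rewrite author's own statement) =====
-- stated objective: simpler
-- what changed: Reorganized from value-major bucketing into a dict to prefix-major: for each prefix, partition the remaining values in one comprehension pass, so the dict, the matched flag and the inner break-loop disappear.
import Mathlib
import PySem

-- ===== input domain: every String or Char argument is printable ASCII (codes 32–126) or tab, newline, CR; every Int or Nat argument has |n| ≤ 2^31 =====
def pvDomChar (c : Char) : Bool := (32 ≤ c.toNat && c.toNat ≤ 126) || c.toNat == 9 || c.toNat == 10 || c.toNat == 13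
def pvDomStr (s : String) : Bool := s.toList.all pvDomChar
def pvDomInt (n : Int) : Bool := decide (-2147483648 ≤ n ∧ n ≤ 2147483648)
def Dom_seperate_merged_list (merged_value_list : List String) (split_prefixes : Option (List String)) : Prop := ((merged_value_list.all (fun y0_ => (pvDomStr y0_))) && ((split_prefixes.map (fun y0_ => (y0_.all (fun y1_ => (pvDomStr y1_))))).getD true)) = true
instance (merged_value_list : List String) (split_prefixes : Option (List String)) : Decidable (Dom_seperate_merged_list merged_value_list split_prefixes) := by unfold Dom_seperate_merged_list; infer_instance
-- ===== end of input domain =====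

-- B replaces A's value-major loop (dict of buckets + matched flag + inner break) by a
-- prefix-major partition of a shrinking `remaining` list; equivalence of the two is proved in full.

-- ===== PORT A =====
-- inner 'for p in split_prefixes: if v.startswith(p): … break' loop: first matching prefix
def pvFirstMatchA : List String → String → Option String
  | [], _ => none
  | p :: rest, v => if PySem.Str.startswith v p then some p else pvFirstMatchA rest v

def seperate_merged_list (merged_value_list : List String) (split_prefixes : Option (List String)) : List (List String) :=
  match split_prefixes with
  | none => [merged_value_list]
  | some ps =>
    if ps.isEmpty then [merged_value_list]   -- 'if split_prefixes:' is falsy for []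
    else
      let d0 : PySem.Dict String (List String) := ps.foldl (fun d p => d.insert p []) PySem.Dict.empty
      let st := merged_value_list.foldl
        (fun (st : PySem.Dict String (List String) × List String) v =>
          match pvFirstMatchA ps v with
          | some p => (st.1.modify p [] (· ++ [v]), st.2)   -- prefix_buckets[p].append(v)
          | none => (st.1, st.2 ++ [v]))                     -- other_bucket.append(v)
        (d0, [])
      let extract := st.1.values.foldl (fun acc b => if 2 ≤ b.length then acc ++ [b] else acc) []
      let extract := if 2 ≤ st.2.length then extract ++ [st.2] else extract
      if extract.isEmpty then [merged_value_list] else extract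

-- ===== PORT B =====
-- the prefix-major loop of Source B: bucket per prefix, remaining shrinks
def pvPartitionB : List String → List String → List (List String) × List String
  | [], remaining => ([], remaining)
  | p :: rest, remaining =>
      let bucket := remaining.filter (fun v => PySem.Str.startswith v p)
      let r := pvPartitionB rest (remaining.filter (fun v => !PySem.Str.startswith v p))
      (bucket :: r.1, r.2)

def seperate_merged_list_alt (merged_value_list : List String) (split_prefixes : Option (List String)) : List (List String) :=
  match split_prefixes with
  | none => [merged_value_list]
  | some ps =>
    if ps.isEmpty then [merged_value_list]
    else
      let r := pvPartitionB ps merged_value_list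
      let extract := r.1.filter (fun b => decide (2 ≤ b.length))
      let extract := if 2 ≤ r.2.length then extract ++ [r.2] else extract
      if extract.isEmpty then [merged_value_list] else extract

-- ===== PRECONDITION & SPEC =====
def Spec_seperate_merged_list (merged_value_list : List String) (split_prefixes : Option (List String)) (out : List (List String)) : Prop := out = seperate_merged_list_alt merged_value_list split_prefixes
instance (merged_value_list : List String) (split_prefixes : Option (List String)) (out : List (List String)) : Decidable (Spec_seperate_merged_list merged_value_list split_prefixes out) := by unfold Spec_seperate_merged_list; infer_instance

-- ===== CLAIM (what is proved, stated in full; the proofs are below) =====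
def Claim_equal_seperate_merged_list : Prop := ∀ (merged_value_list : List String) (split_prefixes : Option (List String)), Dom_seperate_merged_list merged_value_list split_prefixes → Spec_seperate_merged_list merged_value_list split_prefixes (seperate_merged_list merged_value_list split_prefixes)

-- ===== LEMMAS AND PROOFS =====

-- firstMatch returns a member that v starts with
theorem pvFM_mem {ps : List String} {v p : String} (h : pvFirstMatchA ps v = some p) : p ∈ ps := by
  induction ps with
  | nil => simp [pvFirstMatchA] at h
  | cons q rest ih =>
    simp only [pvFirstMatchA] at h
    split at h
    · cases h; exact List.mem_cons_self
    · exact List.mem_cons_of_mem _ (ih h)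

theorem pvFM_startswith {ps : List String} {v p : String} (h : pvFirstMatchA ps v = some p) : PySem.Str.startswith v p = true := by
  induction ps with
  | nil => simp [pvFirstMatchA] at h
  | cons q rest ih =>
    simp only [pvFirstMatchA] at h
    split at h
    · cases h; assumption
    · exact ih h

-- removing prefixes equal to p from the list does not change firstMatch when v does not start with p
theorem pvFM_filter_ne {p v : String} (hv : PySem.Str.startswith v p = false) :
    ∀ rest : List String, pvFirstMatchA (rest.filter (fun q => q ≠ p)) v = pvFirstMatchA rest v := by
  intro rest
  induction rest with
  | nil => rfl
  | cons r rest ih =>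
    simp only [List.filter_cons]
    by_cases hr : r = p
    · subst hr
      rw [if_neg (by simp)]
      simp only [pvFirstMatchA]
      rw [hv]
      simpa using ih
    · rw [if_pos (by simp [hr])]
      simp only [pvFirstMatchA]
      rw [ih]

-- ===== the A-side state loop, split and characterised =====

theorem pvLoop_split (ps : List String) :
    ∀ (vs : List String) (d : PySem.Dict String (List String)) (o : List String),
    vs.foldl (fun (st : PySem.Dict String (List String) × List String) v =>
        match pvFirstMatchA ps v with
        | some p => (st.1.modify p [] (· ++ [v]), st.2)
        | none => (st.1, st.2 ++ [v])) (d, o)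
    = (vs.foldl (fun d v => match pvFirstMatchA ps v with
        | some p => d.modify p [] (· ++ [v])
        | none => d) d,
       o ++ vs.filter (fun v => pvFirstMatchA ps v == none)) := by
  intro vs
  induction vs with
  | nil => intro d o; simp [List.foldl]
  | cons v vs ih =>
    intro d o
    simp only [List.foldl_cons, List.filter_cons]
    cases h : pvFirstMatchA ps v with
    | some p => simp [h, ih]
    | none => simp [h, ih]

-- the dict loop is the pairs-fold of `(firstMatch v, v)` over the matched values
theorem pvDictLoop_eq (ps : List String) :
    ∀ (vs : List String) (d : PySem.Dict String (List String)),
    vs.foldl (fun d v => match pvFirstMatchA ps v with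
        | some p => d.modify p [] (· ++ [v])
        | none => d) d
    = (vs.filterMap (fun v => (pvFirstMatchA ps v).map (fun p => (p, v)))).foldl
        (fun d q => d.modify q.1 [] (· ++ [q.2])) d := by
  intro vs
  induction vs with
  | nil => intro d; rfl
  | cons v vs ih =>
    intro d
    cases h : pvFirstMatchA ps v with
    | some p => simp [List.filterMap_cons, h, ih]
    | none => simp [List.filterMap_cons, h, ih]

theorem pvPairsFilter (ps : List String) (c : String) :
    ∀ vs : List String,
    ((vs.filterMap (fun v => (pvFirstMatchA ps v).map (fun p => (p, v)))).filter (fun q => q.1 == c)).map (·.2)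
    = vs.filter (fun v => pvFirstMatchA ps v == some c) := by
  intro vs
  induction vs with
  | nil => rfl
  | cons v vs ih =>
    cases h : pvFirstMatchA ps v with
    | some p =>
      by_cases hc : p = c
      · subst hc; simp [List.filterMap_cons, h, List.filter_cons, ih]
      · simp [List.filterMap_cons, h, List.filter_cons, hc, ih]
    | none => simp [List.filterMap_cons, h, List.filter_cons, ih]

-- the initial dict: keys = distinct prefixes, every value []
theorem pvD0_keys (ps : List String) :
    (ps.foldl (fun d p => d.insert p ([] : List String)) PySem.Dict.empty).keys = PySem.Set.ofList ps := by
  rw [PySem.Dict.keys_foldl_insert (f := fun _ _ => [])]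
  rfl

theorem pvD0_getD (ps : List String) (c : String) :
    (ps.foldl (fun d p => d.insert p ([] : List String)) PySem.Dict.empty).getD c [] = [] := by
  have h : ∀ (l : List String) (d : PySem.Dict String (List String)),
      (∀ k, d.getD k [] = []) → (l.foldl (fun d p => d.insert p []) d).getD c [] = [] := by
    intro l
    induction l with
    | nil => intro d hd; exact hd c
    | cons p rest ih =>
      intro d hd
      refine ih _ ?_
      intro k
      rw [PySem.Dict.getD_insert]
      split <;> simp [hd]
  exact h ps PySem.Dict.empty (fun k => by simp)

-- ===== Set.ofList structural lemmas needed for the bucket-order argument =====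

theorem pvFoldlAdd_skip {p : String} : ∀ (l : List String) (s : PySem.Set String), p ∈ s →
    l.foldl PySem.Set.add s = (l.filter (fun q => q ≠ p)).foldl PySem.Set.add s := by
  intro l
  induction l with
  | nil => intro s _; rfl
  | cons q rest ih =>
    intro s hp
    by_cases hq : q = p
    · subst hq
      have : PySem.Set.add s q = s := by
        simp [PySem.Set.add, PySem.Set.contains, hp]
      simp [List.filter_cons, List.foldl_cons, this, ih s hp]
    · have hp' : p ∈ PySem.Set.add s q := by
        simp [PySem.Set.add]; split <;> simp [hp]
      simp [List.filter_cons, hq, List.foldl_cons, ih _ hp']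

theorem pvFoldlAdd_cons {p : String} : ∀ (l : List String) (s : PySem.Set String), (∀ q ∈ l, q ≠ p) → p ∉ s →
    l.foldl PySem.Set.add (p :: s) = p :: l.foldl PySem.Set.add s := by
  intro l
  induction l with
  | nil => intro s _ _; rfl
  | cons q rest ih =>
    intro s hl hp
    have hq : q ≠ p := hl q List.mem_cons_self
    have hc : (PySem.Set.contains (p :: s) q) = PySem.Set.contains s q := by
      simp [PySem.Set.contains]
      exact fun h => absurd h hq
    have hstep : PySem.Set.add (p :: s) q = p :: PySem.Set.add s q := by
      simp only [PySem.Set.add, hc]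
      split <;> simp
    have hrest : ∀ r ∈ rest, r ≠ p := fun r hr => hl r (List.mem_cons_of_mem _ hr)
    have hp' : p ∉ PySem.Set.add s q := by
      simp only [PySem.Set.add]
      split
      · exact hp
      · simp [hp, hq.symm]
    rw [List.foldl_cons, hstep, List.foldl_cons, ih _ hrest hp']

theorem pvOfList_cons_filter (p : String) (rest : List String) :
    PySem.Set.ofList (p :: rest) = p :: PySem.Set.ofList (rest.filter (fun q => q ≠ p)) := by
  have h1 : ∀ q ∈ rest.filter (fun q => q ≠ p), q ≠ p := by
    intro q hq
    simpa using List.of_mem_filter hq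
  rw [PySem.Set.ofList_eq_foldl, PySem.Set.ofList_eq_foldl, List.foldl_cons]
  calc List.foldl PySem.Set.add (PySem.Set.add [] p) rest
      = List.foldl PySem.Set.add [p] rest := rfl
    _ = List.foldl PySem.Set.add [p] (rest.filter (fun q => q ≠ p)) :=
        pvFoldlAdd_skip rest [p] (by simp)
    _ = p :: List.foldl PySem.Set.add [] (rest.filter (fun q => q ≠ p)) :=
        pvFoldlAdd_cons _ ([] : List String) h1 (by simp)

-- ===== B-side characterisation =====

theorem pvPartB_other (ps : List String) : ∀ vs : List String,
    (pvPartitionB ps vs).2 = vs.filter (fun v => pvFirstMatchA ps v == none) := by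
  induction ps with
  | nil => intro vs; simp [pvPartitionB, pvFirstMatchA]
  | cons p rest ih =>
    intro vs
    simp only [pvPartitionB, ih, List.filter_filter]
    apply List.filter_congr
    intro v _
    simp only [pvFirstMatchA]
    cases PySem.Str.startswith v p <;> simp

-- prefixes that can match nothing in vs contribute an empty (hence dropped) bucket and leave `remaining` alone
theorem pvPartB_drop_dead {p : String} : ∀ (rest vs : List String), (∀ v ∈ vs, PySem.Str.startswith v p = false) →
    ((pvPartitionB rest vs).1).filter (fun b => decide (2 ≤ b.length))
    = ((pvPartitionB (rest.filter (fun q => q ≠ p)) vs).1).filter (fun b => decide (2 ≤ b.length)) := by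
  intro rest
  induction rest with
  | nil => intro vs _; rfl
  | cons r rest ih =>
    intro vs hvs
    by_cases hr : r = p
    · subst hr
      have hb : vs.filter (fun v => PySem.Str.startswith v r) = [] :=
        List.filter_eq_nil_iff.mpr (fun v hv => by rw [hvs v hv]; exact Bool.false_ne_true)
      have hrem : vs.filter (fun v => !PySem.Str.startswith v r) = vs :=
        List.filter_eq_self.mpr (fun v hv => by rw [hvs v hv]; decide)
      have hfc : (r :: rest).filter (fun q => q ≠ r) = rest.filter (fun q => q ≠ r) := by simp
      rw [hfc]
      simp only [pvPartitionB, hb, hrem, List.filter_cons]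
      rw [if_neg (by decide), ih vs hvs]
    · have hvs' : ∀ v ∈ vs.filter (fun v => !PySem.Str.startswith v r), PySem.Str.startswith v p = false :=
        fun v hv => hvs v (List.mem_of_mem_filter hv)
      have hfc : (r :: rest).filter (fun q => q ≠ p) = r :: rest.filter (fun q => q ≠ p) := by
        simp [hr]
      rw [hfc]
      simp only [pvPartitionB, List.filter_cons]
      rw [ih _ hvs']

-- ===== the crux: B's kept buckets are A's kept buckets =====

theorem pvCrux : ∀ (n : Nat) (ps vs : List String), ps.length ≤ n →
    ((pvPartitionB ps vs).1).filter (fun b => decide (2 ≤ b.length))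
    = ((PySem.Set.ofList ps).map (fun p => vs.filter (fun v => pvFirstMatchA ps v == some p))).filter
        (fun b => decide (2 ≤ b.length)) := by
  intro n
  induction n with
  | zero =>
    intro ps vs hlen
    have : ps = [] := List.eq_nil_of_length_eq_zero (Nat.le_zero.mp hlen)
    subst this; rfl
  | succ n ih =>
    intro ps vs hlen
    cases ps with
    | nil => rfl
    | cons p rest =>
      have hrest : rest.length ≤ n := Nat.lt_succ_iff.mp (by simpa using hlen)
      set rest' := rest.filter (fun q => q ≠ p) with hrest'
      have hrest'len : rest'.length ≤ n := le_trans (List.length_filter_le _ _) hrest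
      set vs' := vs.filter (fun v => !PySem.Str.startswith v p) with hvs'
      -- head bucket agrees
      have hhead : vs.filter (fun v => pvFirstMatchA (p :: rest) v == some p)
          = vs.filter (fun v => PySem.Str.startswith v p) := by
        apply List.filter_congr
        intro v _
        simp only [pvFirstMatchA]
        cases h : PySem.Str.startswith v p with
        | true => simp
        | false =>
          simp only [Bool.false_eq_true, if_false]
          cases hm : pvFirstMatchA rest v with
          | none => simp
          | some q =>
            by_cases hq : q = p
            · subst hq
              have h' := pvFM_startswith hm
              rw [h'] at h
              exact absurd h (by decide)
            · simp [hq]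
      -- tail buckets agree entrywise with the partition of vs' by rest'
      have htail : ∀ q ∈ PySem.Set.ofList rest',
          vs.filter (fun v => pvFirstMatchA (p :: rest) v == some q)
          = vs'.filter (fun v => pvFirstMatchA rest' v == some q) := by
        intro q hq
        have hq_mem : q ∈ rest' := by
          simpa using (PySem.Set.mem_ofList rest' q).mp hq
        have hqp : q ≠ p := by simpa using (List.of_mem_filter hq_mem)
        rw [hvs', List.filter_filter]
        apply List.filter_congr
        intro v _
        simp only [pvFirstMatchA]
        cases h : PySem.Str.startswith v p with
        | true => simp [Ne.symm hqp]
        | false =>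
          simp only [Bool.false_eq_true, if_false, Bool.not_false, Bool.and_true]
          rw [hrest', pvFM_filter_ne h rest]
      have hvs'dead : ∀ v ∈ vs', PySem.Str.startswith v p = false := by
        intro v hv
        have := List.of_mem_filter hv
        simpa using this
      calc ((pvPartitionB (p :: rest) vs).1).filter (fun b => decide (2 ≤ b.length))
          = ((vs.filter (fun v => PySem.Str.startswith v p)) :: (pvPartitionB rest vs').1).filter
              (fun b => decide (2 ≤ b.length)) := by
              rw [hvs']; rfl
        _ = ((vs.filter (fun v => PySem.Str.startswith v p)) :: (pvPartitionB rest' vs').1).filter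
              (fun b => decide (2 ≤ b.length)) := by
              simp only [List.filter_cons]
              rw [pvPartB_drop_dead rest vs' hvs'dead, ← hrest']
        _ = ((vs.filter (fun v => PySem.Str.startswith v p)) ::
              (PySem.Set.ofList rest').map (fun q => vs'.filter (fun v => pvFirstMatchA rest' v == some q))).filter
              (fun b => decide (2 ≤ b.length)) := by
              simp only [List.filter_cons]
              rw [ih rest' vs' hrest'len]
        _ = ((PySem.Set.ofList (p :: rest)).map (fun q => vs.filter (fun v => pvFirstMatchA (p :: rest) v == some q))).filter
              (fun b => decide (2 ≤ b.length)) := by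
              rw [pvOfList_cons_filter, ← hrest']
              simp only [List.map_cons, List.filter_cons, hhead]
              rw [List.map_congr_left htail]

-- A's final dict: keys unchanged, value at c = the values whose first match is c
theorem pvFinalDict (ps vs : List String) :
    let d0 : PySem.Dict String (List String) := ps.foldl (fun d p => d.insert p []) PySem.Dict.empty
    let fd := vs.foldl (fun d v => match pvFirstMatchA ps v with
        | some p => d.modify p [] (· ++ [v])
        | none => d) d0
    fd.values = (PySem.Set.ofList ps).map (fun p => vs.filter (fun v => pvFirstMatchA ps v == some p)) := by
  intro d0 fd
  have hpairs : fd = (vs.filterMap (fun v => (pvFirstMatchA ps v).map (fun p => (p, v)))).foldl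
      (fun d q => d.modify q.1 [] (· ++ [q.2])) d0 := pvDictLoop_eq ps vs d0
  set l := vs.filterMap (fun v => (pvFirstMatchA ps v).map (fun p => (p, v))) with hl
  have hd0keys : d0.keys = PySem.Set.ofList ps := pvD0_keys ps
  have hkeys : fd.keys = PySem.Set.ofList ps := by
    rw [hpairs]
    rw [PySem.Dict.keys_foldl_modify_key (key := fun (q : String × String) => q.1) (f := fun _ q => (· ++ [q.2]))]
    rw [PySem.Set.update_eq_append_filter, hd0keys]
    have hmem : ∀ q ∈ PySem.Set.ofList (l.map (·.1)), q ∈ ps := by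
      intro q hq
      have hq' : q ∈ l.map (·.1) := (PySem.Set.mem_ofList _ _).mp hq
      obtain ⟨pr, hpr, hq2⟩ := List.mem_map.mp hq'
      obtain ⟨v, _, hv2⟩ := List.mem_filterMap.mp hpr
      obtain ⟨p, hp1, hp2⟩ := Option.map_eq_some_iff.mp hv2
      cases hp2; cases hq2
      exact pvFM_mem hp1
    have hnil : (PySem.Set.ofList (l.map (·.1))).filter (fun y => !(PySem.Set.contains (PySem.Set.ofList ps) y)) = [] := by
      apply List.filter_eq_nil_iff.mpr
      intro q hq
      simp [PySem.Set.contains, PySem.Set.mem_ofList, hmem q hq]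
    simp only [hnil, List.append_nil]
  have hnodup : fd.keys.Nodup := by rw [hkeys]; exact PySem.Set.nodup_ofList ps
  rw [PySem.Dict.values_eq_map_keys fd hnodup [], hkeys]
  apply List.map_congr_left
  intro p _
  rw [hpairs, PySem.Dict.getD_foldl_modify_append, pvD0_getD, pvPairsFilter]
  simp

-- the A-side extract loop is a filter
theorem pvExtract_filter (bs : List (List String)) :
    bs.foldl (fun acc b => if 2 ≤ b.length then acc ++ [b] else acc) []
    = bs.filter (fun b => decide (2 ≤ b.length)) := by
  simpa using PySem.List.foldl_append_ite_eq_filter (p := fun b : List String => 2 ≤ b.length) (l := bs) (acc := [])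

-- ===== VERDICT (by name: the statement is the Claim_ definition above) =====
theorem seperate_merged_list_spec : Claim_equal_seperate_merged_list := by
  intro mvl sp _
  unfold Spec_seperate_merged_list seperate_merged_list seperate_merged_list_alt
  cases sp with
  | none => rfl
  | some ps =>
    by_cases hps : ps.isEmpty
    · simp [hps]
    · simp only [hps]
      rw [pvLoop_split ps mvl _ []]
      have hother : (pvPartitionB ps mvl).2 = mvl.filter (fun v => pvFirstMatchA ps v == none) :=
        pvPartB_other ps mvl
      have hbuckets :
          ((mvl.foldl (fun d v => match pvFirstMatchA ps v with
              | some p => d.modify p [] (· ++ [v])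
              | none => d) (ps.foldl (fun d p => d.insert p []) PySem.Dict.empty)).values).filter
            (fun b => decide (2 ≤ b.length))
          = ((pvPartitionB ps mvl).1).filter (fun b => decide (2 ≤ b.length)) := by
        rw [pvFinalDict ps mvl, ← pvCrux ps.length ps mvl le_rfl]
      simp only [pvExtract_filter, List.nil_append]
      rw [hbuckets, ← hother]
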